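-- pv_equiv track=rewrite | github.com/z-william131/small_projects | FileSort/FileSort.py | setLabel
-- ===== SOURCE A (Python) =====
-- def setLabel(path):
--     indexs = []
--     index = 0
--     for p in path:
--         if p == "/":
--             indexs.append(index)
--         index += 1
--     main_tag, sub_tag, sub_tag2, file = "None", "None", "None", "None"
--
--     if len(indexs) == 1:
--         file = path[(indexs[0] + 1):]
--     if len(indexs) == 2:
--         main_tag = path[(indexs[0] + 1) : indexs[1]]
--         file = path[(indexs[1] + 1):]
--     if len(indexs) == 3:
--         main_tag = path[(indexs[0] + 1) : indexs[1]]
--         sub_tag = path[(indexs[1] + 1) : indexs[2]]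
--         file = path[(indexs[2] + 1):]
--     if len(indexs) == 4:
--         main_tag = path[(indexs[0] + 1) : indexs[1]]
--         sub_tag = path[(indexs[1] + 1) : indexs[2]]
--         sub_tag2 = path[(indexs[2] + 1) : indexs[3]]
--         file = path[(indexs[3] + 1):]
--
--     return [file, path, main_tag, sub_tag, sub_tag2]
-- ===== SOURCE B (Python) =====
-- def setLabel(path):
--     parts = path.split('/')
--     n = len(parts) - 1
--     if 1 <= n <= 4:
--         segs = parts[1:]
--         tags = segs[:-1] + ["None"] * (4 - n)
--         return [segs[-1], path] + tags
--     return ["None", path, "None", "None", "None"]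
-- ===== Notes on version B (the rewrite author's own statement) =====
-- stated objective: simpler
-- what changed: B replaces A's manual per-character slash-index collection and four explicit length branches of index slicing with a single split('/') followed by one uniform tail assignment (last segment is the file, preceding segments padded with 'None' are the tags).
import Mathlib
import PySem

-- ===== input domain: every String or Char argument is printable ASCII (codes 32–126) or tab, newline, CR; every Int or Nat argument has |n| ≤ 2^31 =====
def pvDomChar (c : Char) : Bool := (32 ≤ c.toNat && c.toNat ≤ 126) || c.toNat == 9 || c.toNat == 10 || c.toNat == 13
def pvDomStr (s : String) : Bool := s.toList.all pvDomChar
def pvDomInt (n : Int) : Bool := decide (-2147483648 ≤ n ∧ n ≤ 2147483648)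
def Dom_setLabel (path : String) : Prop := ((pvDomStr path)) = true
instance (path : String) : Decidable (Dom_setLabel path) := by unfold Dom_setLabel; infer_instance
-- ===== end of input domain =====

-- B replaces A's slash-index bookkeeping and four length branches with a single
-- split on '/' and one uniform tail assignment (objective: simpler).

-- ===== PORT A =====
def setLabel (path : String) : List String :=
  let l := path.toList
  let indexs : List Int :=
    (l.foldl (fun (st : List Int × Int) p =>
      (if p = '/' then st.1 ++ [st.2] else st.1, st.2 + 1)) ([], 0)).1
  let s0 : String × String × String × String := ("None", "None", "None", "None")
  let s1 := if indexs.length = 1 then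
      (s0.1, s0.2.1, s0.2.2.1,
       String.ofList (PySem.Chars.slice l (some (indexs.getD 0 0 + 1)) none))
    else s0
  let s2 := if indexs.length = 2 then
      (String.ofList (PySem.Chars.slice l (some (indexs.getD 0 0 + 1)) (some (indexs.getD 1 0))),
       s1.2.1, s1.2.2.1,
       String.ofList (PySem.Chars.slice l (some (indexs.getD 1 0 + 1)) none))
    else s1
  let s3 := if indexs.length = 3 then
      (String.ofList (PySem.Chars.slice l (some (indexs.getD 0 0 + 1)) (some (indexs.getD 1 0))),
       String.ofList (PySem.Chars.slice l (some (indexs.getD 1 0 + 1)) (some (indexs.getD 2 0))),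
       s2.2.2.1,
       String.ofList (PySem.Chars.slice l (some (indexs.getD 2 0 + 1)) none))
    else s2
  let s4 := if indexs.length = 4 then
      (String.ofList (PySem.Chars.slice l (some (indexs.getD 0 0 + 1)) (some (indexs.getD 1 0))),
       String.ofList (PySem.Chars.slice l (some (indexs.getD 1 0 + 1)) (some (indexs.getD 2 0))),
       String.ofList (PySem.Chars.slice l (some (indexs.getD 2 0 + 1)) (some (indexs.getD 3 0))),
       String.ofList (PySem.Chars.slice l (some (indexs.getD 3 0 + 1)) none))
    else s3
  [s4.2.2.2, path, s4.1, s4.2.1, s4.2.2.1]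

-- ===== PORT B =====
def setLabel_alt (path : String) : List String :=
  let parts : List String := (path.toList.splitOn '/').map String.ofList
  let n : Int := (parts.length : Int) - 1
  if 1 ≤ n ∧ n ≤ 4 then
    let segs := parts.drop 1
    let tags := segs.dropLast ++ List.replicate (4 - n).toNat "None"
    segs.getLastD "" :: path :: tags
  else ["None", path, "None", "None", "None"]

-- ===== PRECONDITION & SPEC =====
def Spec_setLabel (path : String) (out : List String) : Prop := out = setLabel_alt path
instance (path : String) (out : List String) : Decidable (Spec_setLabel path out) := by unfold Spec_setLabel; infer_instance

-- ===== CLAIM (what is proved, stated in full; the proofs are below) =====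
def Claim_equal_setLabel : Prop := ∀ (path : String), Dom_setLabel path → Spec_setLabel path (setLabel path)

-- ===== LEMMAS AND PROOFS =====

/-- Positions (as Ints, starting at `i`) of the slashes of `l`. -/
def slashPos : List Char → Int → List Int
  | [], _ => []
  | c :: t, i => if c = '/' then i :: slashPos t (i + 1) else slashPos t (i + 1)

theorem fold_eq (l : List Char) : ∀ (acc : List Int) (i : Int),
    l.foldl (fun (st : List Int × Int) p =>
      (if p = '/' then st.1 ++ [st.2] else st.1, st.2 + 1)) (acc, i)
    = (acc ++ slashPos l i, i + l.length) := by
  induction l with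
  | nil => intro acc i; simp [slashPos]
  | cons c t ih =>
    intro acc i
    by_cases h : c = '/'
    · simp [h, slashPos, ih]; omega
    · simp [h, slashPos, ih]; omega

theorem slashPos_append (x y : List Char) (i : Int) :
    slashPos (x ++ y) i = slashPos x i ++ slashPos y (i + x.length) := by
  induction x generalizing i with
  | nil => simp [slashPos]
  | cons c t ih =>
    by_cases h : c = '/' <;> simp [slashPos, h, ih] <;>
      (first | rfl | (congr 1; ring))

theorem slashPos_free (p : List Char) (h : ('/' : Char) ∉ p) : ∀ i, slashPos p i = [] := by
  induction p with
  | nil => intro i; simp [slashPos]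
  | cons c t ih =>
    intro i
    simp at h
    have hc : ¬ c = '/' := fun hc => h.1 hc.symm
    simp [slashPos, hc, ih h.2]

theorem slash_not_mem (l : List Char) : ∀ p ∈ l.splitOn '/', ('/' : Char) ∉ p := by
  induction l with
  | nil => simp [List.splitOn, List.splitOnP_nil]
  | cons c t ih =>
    simp only [List.splitOn, List.splitOnP_cons] at *
    split
    · next h => simp_all
    · next h =>
      intro q hq
      rcases List.exists_cons_of_ne_nil (List.splitOnP_ne_nil _ t) with ⟨hd, tl, he⟩
      rw [he] at hq ih
      simp [List.modifyHead] at hq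
      rcases hq with rfl | hq
      · intro hc
        rcases List.mem_cons.1 hc with rfl | hc
        · exact h (by simp)
        · exact ih hd (by simp) hc
      · exact ih _ (by simp [hq])

theorem intercalate_cons₂ (x : List Char) (l : List (List Char)) (hl : l ≠ []) :
    List.intercalate ['/'] (x :: l) = x ++ '/' :: List.intercalate ['/'] l := by
  rcases List.exists_cons_of_ne_nil hl with ⟨y, t, rfl⟩
  simp [List.intercalate, List.intersperse]

theorem slashPos_intercalate_len (parts : List (List Char))
    (hfree : ∀ p ∈ parts, ('/' : Char) ∉ p) (hne : parts ≠ []) :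
    ∀ i, (slashPos (List.intercalate ['/'] parts) i).length = parts.length - 1 := by
  induction parts with
  | nil => exact absurd rfl hne
  | cons x l ih =>
    intro i
    rcases eq_or_ne l [] with rfl | hl
    · simp [List.intercalate, slashPos_free x (hfree x (by simp)) i]
    · rw [intercalate_cons₂ x l hl, slashPos_append,
        slashPos_free x (hfree x (by simp))]
      simp only [slashPos]
      have := ih (fun p hp => hfree p (by simp [hp])) hl (i + ↑x.length + 1)
      simp [this]
      rcases List.exists_cons_of_ne_nil hl with ⟨y, t, rfl⟩
      simp

theorem end_slice (l pre seg : List Char) (a : Int) (ha : a = pre.length)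
    (h : l = pre ++ '/' :: seg) : PySem.List.slice l (some (a + 1)) none = seg := by
  subst ha h
  rw [show ((pre.length : Int) + 1) = ((pre.length + 1 : Nat) : Int) by push_cast; ring,
    PySem.List.slice_from_natCast,
    show pre ++ '/' :: seg = (pre ++ ['/']) ++ seg by simp,
    show pre.length + 1 = (pre ++ ['/']).length by simp]
  exact List.drop_left

theorem seg_slice (l pre seg rest : List Char) (a b : Int) (ha : a = pre.length)
    (hb : b = (pre.length : Int) + 1 + seg.length)
    (h : l = pre ++ '/' :: (seg ++ '/' :: rest)) :
    PySem.List.slice l (some (a + 1)) (some b) = seg := by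
  subst ha hb h
  rw [show ((pre.length : Int) + 1 + seg.length) = ((pre.length + 1 + seg.length : Nat) : Int) by push_cast; ring,
    show ((pre.length : Int) + 1) = ((pre.length + 1 : Nat) : Int) by push_cast; ring,
    PySem.List.slice_natCast,
    show pre ++ '/' :: (seg ++ '/' :: rest) = (pre ++ ['/']) ++ (seg ++ '/' :: rest) by simp,
    show pre.length + 1 = (pre ++ ['/']).length by simp]
  rw [List.drop_left, show (pre ++ ['/']).length + seg.length - (pre ++ ['/']).length = seg.length by omega]
  exact List.take_left

theorem keyP (path : String) (parts : List (List Char))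
    (hfree : ∀ p ∈ parts, ('/' : Char) ∉ p) (hne : parts ≠ [])
    (hl : path.toList = List.intercalate ['/'] parts) :
    setLabel path = setLabel_alt path := by
  have hsplit : path.toList.splitOn '/' = parts := by
    rw [hl]; exact List.splitOn_intercalate parts '/' hfree hne
  rcases parts with _ | ⟨p0, _ | ⟨p1, _ | ⟨p2, _ | ⟨p3, _ | ⟨p4, _ | ⟨p5, rest⟩⟩⟩⟩⟩⟩
  · exact absurd rfl hne
  · -- 0 slashes
    have h0 : path.toList = p0 := by simpa [List.intercalate] using hl
    have hidx : slashPos path.toList 0 = [] := by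
      rw [h0]; exact slashPos_free p0 (hfree p0 (by simp)) 0
    simp [setLabel, setLabel_alt, fold_eq, hidx, hsplit]
  · -- 1 slash
    have h0 : path.toList = p0 ++ '/' :: p1 := by
      simpa [intercalate_cons₂ p0 [p1] (by simp), List.intercalate] using hl
    have hidx : slashPos path.toList 0 = [(p0.length : Int)] := by
      rw [h0, show p0 ++ '/' :: p1 = p0 ++ ('/' :: p1) from rfl, slashPos_append,
        slashPos_free p0 (hfree p0 (by simp)) 0]
      simp [slashPos, slashPos_free p1 (hfree p1 (by simp))]
    have hdrop : path.toList.drop (p0.length + 1) = p1 := by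
      rw [h0, show p0 ++ '/' :: p1 = (p0 ++ ['/']) ++ p1 by simp,
        show p0.length + 1 = (p0 ++ ['/']).length by simp]
      exact List.drop_left
    have hsl : PySem.List.slice path.toList (some ((p0.length : Int) + 1)) none = p1 := by
      rw [show ((p0.length : Int) + 1) = ((p0.length + 1 : Nat) : Int) by push_cast; ring,
        PySem.List.slice_from_natCast, hdrop]
    simp [setLabel, setLabel_alt, fold_eq, hidx, hsl, hsplit]
  · -- 2 slashes
    have h0 : path.toList = p0 ++ '/' :: (p1 ++ '/' :: p2) := by
      simpa [intercalate_cons₂ p0 [p1, p2] (by simp),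
        intercalate_cons₂ p1 [p2] (by simp), List.intercalate] using hl
    have hidx : slashPos path.toList 0
        = [(p0.length : Int), (p0.length : Int) + 1 + p1.length] := by
      rw [h0, slashPos_append, slashPos_free p0 (hfree p0 (by simp)) 0]
      simp only [slashPos, List.nil_append]
      rw [slashPos_append, slashPos_free p1 (hfree p1 (by simp))]
      simp only [slashPos, List.nil_append,
        slashPos_free p2 (hfree p2 (by simp))]
      norm_num
    have h1 := seg_slice path.toList p0 p1 p2 (p0.length : Int)
      ((p0.length : Int) + 1 + p1.length) rfl rfl h0
    have h2 := end_slice path.toList (p0 ++ '/' :: p1) p2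
      ((p0.length : Int) + 1 + p1.length) (by simp; ring) (by simp [h0])
    simp [setLabel, setLabel_alt, fold_eq, hidx, h1, h2, hsplit]
  · -- 3 slashes
    have h0 : path.toList = p0 ++ '/' :: (p1 ++ '/' :: (p2 ++ '/' :: p3)) := by
      simpa [intercalate_cons₂ p0 [p1, p2, p3] (by simp),
        intercalate_cons₂ p1 [p2, p3] (by simp),
        intercalate_cons₂ p2 [p3] (by simp), List.intercalate] using hl
    have hidx : slashPos path.toList 0
        = [(p0.length : Int), (p0.length : Int) + 1 + p1.length,
           (p0.length : Int) + 1 + p1.length + 1 + p2.length] := by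
      rw [h0, slashPos_append, slashPos_free p0 (hfree p0 (by simp)) 0]
      simp only [slashPos, List.nil_append]
      rw [slashPos_append, slashPos_free p1 (hfree p1 (by simp))]
      simp only [slashPos, List.nil_append]
      rw [slashPos_append, slashPos_free p2 (hfree p2 (by simp))]
      simp only [slashPos, List.nil_append,
        slashPos_free p3 (hfree p3 (by simp))]
      norm_num
    have h1 := seg_slice path.toList p0 p1 (p2 ++ '/' :: p3) (p0.length : Int)
      ((p0.length : Int) + 1 + p1.length) rfl rfl (by simpa using h0)
    have h2 := seg_slice path.toList (p0 ++ '/' :: p1) p2 p3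
      ((p0.length : Int) + 1 + p1.length)
      ((p0.length : Int) + 1 + p1.length + 1 + p2.length)
      (by simp; ring) (by simp; ring) (by simp [h0])
    have h3 := end_slice path.toList (p0 ++ '/' :: (p1 ++ '/' :: p2)) p3
      ((p0.length : Int) + 1 + p1.length + 1 + p2.length)
      (by simp; ring) (by simp [h0])
    simp [setLabel, setLabel_alt, fold_eq, hidx, h1, h2, h3, hsplit]
  · -- 4 slashes
    have h0 : path.toList = p0 ++ '/' :: (p1 ++ '/' :: (p2 ++ '/' :: (p3 ++ '/' :: p4))) := by
      simpa [intercalate_cons₂ p0 [p1, p2, p3, p4] (by simp),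
        intercalate_cons₂ p1 [p2, p3, p4] (by simp),
        intercalate_cons₂ p2 [p3, p4] (by simp),
        intercalate_cons₂ p3 [p4] (by simp), List.intercalate] using hl
    have hidx : slashPos path.toList 0
        = [(p0.length : Int), (p0.length : Int) + 1 + p1.length,
           (p0.length : Int) + 1 + p1.length + 1 + p2.length,
           (p0.length : Int) + 1 + p1.length + 1 + p2.length + 1 + p3.length] := by
      rw [h0, slashPos_append, slashPos_free p0 (hfree p0 (by simp)) 0]
      simp only [slashPos, List.nil_append]
      rw [slashPos_append, slashPos_free p1 (hfree p1 (by simp))]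
      simp only [slashPos, List.nil_append]
      rw [slashPos_append, slashPos_free p2 (hfree p2 (by simp))]
      simp only [slashPos, List.nil_append]
      rw [slashPos_append, slashPos_free p3 (hfree p3 (by simp))]
      simp only [slashPos, List.nil_append,
        slashPos_free p4 (hfree p4 (by simp))]
      norm_num
    have h1 := seg_slice path.toList p0 p1 (p2 ++ '/' :: (p3 ++ '/' :: p4)) (p0.length : Int)
      ((p0.length : Int) + 1 + p1.length) rfl rfl (by simpa using h0)
    have h2 := seg_slice path.toList (p0 ++ '/' :: p1) p2 (p3 ++ '/' :: p4)
      ((p0.length : Int) + 1 + p1.length)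
      ((p0.length : Int) + 1 + p1.length + 1 + p2.length)
      (by simp; ring) (by simp; ring) (by simp [h0])
    have h3 := seg_slice path.toList (p0 ++ '/' :: (p1 ++ '/' :: p2)) p3 p4
      ((p0.length : Int) + 1 + p1.length + 1 + p2.length)
      ((p0.length : Int) + 1 + p1.length + 1 + p2.length + 1 + p3.length)
      (by simp; ring) (by simp; ring) (by simp [h0])
    have h4 := end_slice path.toList (p0 ++ '/' :: (p1 ++ '/' :: (p2 ++ '/' :: p3))) p4
      ((p0.length : Int) + 1 + p1.length + 1 + p2.length + 1 + p3.length)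
      (by simp; ring) (by simp [h0])
    simp [setLabel, setLabel_alt, fold_eq, hidx, h1, h2, h3, h4, hsplit]
  · -- ≥ 5 slashes
    set ps := p0 :: p1 :: p2 :: p3 :: p4 :: p5 :: rest with hps
    have hlen : (slashPos path.toList 0).length = ps.length - 1 := by
      rw [hl]; exact slashPos_intercalate_len ps hfree hne 0
    have h5 : 5 ≤ (slashPos path.toList 0).length := by simp [hps] at hlen ⊢; omega
    simp only [setLabel, setLabel_alt, fold_eq, List.nil_append, hsplit]
    rw [if_neg (by omega), if_neg (by omega), if_neg (by omega), if_neg (by omega),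
      if_neg (by simp [hps]; omega)]

theorem key (path : String) : setLabel path = setLabel_alt path := by
  exact keyP path (path.toList.splitOn '/') (slash_not_mem path.toList)
    (List.splitOnP_ne_nil _ _) (List.intercalate_splitOn path.toList '/').symm

-- ===== VERDICT (by name: the statement is the Claim_ definition above) =====
theorem setLabel_spec : Claim_equal_setLabel := by
  intro path _
  unfold Spec_setLabel
  exact key path
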